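-- pv_equiv track=rewrite | github.com/Vnukochpok/Game-1000 | logic/logic1000.py | classic
-- ===== SOURCE A (Python) =====
-- def classic(arr):
--     score = 0
--     for i in range(len(arr)):
--         if arr[i] == 1:
--             score += 10
--         elif arr[i] == 5:
--             score += 5
--         else:
--             pass
--
--     target_digits = {2, 3, 4, 6}
--     reroll_dice = 0
--     for item in arr:
--         if item in target_digits:
--             reroll_dice += 1
--     return [score, reroll_dice]
-- ===== SOURCE B (Python) =====
-- def classic(arr):
--     counts = {}
--     for x in arr:
--         counts[x] = counts.get(x, 0) + 1
--     score = 10 * counts.get(1, 0) + 5 * counts.get(5, 0)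
--     reroll = counts.get(2, 0) + counts.get(3, 0) + counts.get(4, 0) + counts.get(6, 0)
--     return [score, reroll]
-- ===== Notes on version B (the rewrite author's own statement) =====
-- stated objective: idiomatic
-- what changed: B builds a frequency table of the dice in one pass and then computes score and reroll count by closed-form arithmetic on four table lookups, instead of A's two separate conditional scans (one index-based, one membership-based).
import Mathlib
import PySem

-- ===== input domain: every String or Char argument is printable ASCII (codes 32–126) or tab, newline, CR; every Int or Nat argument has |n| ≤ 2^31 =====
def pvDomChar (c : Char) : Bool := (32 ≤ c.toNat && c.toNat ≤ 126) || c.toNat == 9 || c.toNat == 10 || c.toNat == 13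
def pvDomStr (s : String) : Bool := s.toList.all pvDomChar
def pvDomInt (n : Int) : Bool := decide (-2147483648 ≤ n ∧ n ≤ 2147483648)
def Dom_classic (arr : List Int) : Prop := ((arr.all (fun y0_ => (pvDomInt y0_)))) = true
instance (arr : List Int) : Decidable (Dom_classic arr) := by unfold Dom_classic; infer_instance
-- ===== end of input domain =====

-- B tabulates the dice counts in one pass and computes both results by closed-form
-- arithmetic on four lookups (more idiomatic than A's two conditional scans); same cost.

-- ===== PORT A =====
def classic (arr : List Int) : List Int :=
  let score := (PySem.List.pyRange 0 arr.length 1).foldl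
    (fun s i =>
      if PySem.List.pyGetD arr i 0 = 1 then s + 10
      else if PySem.List.pyGetD arr i 0 = 5 then s + 5
      else s) 0
  let targetDigits : PySem.Set Int := PySem.Set.ofList [2, 3, 4, 6]
  let rerollDice := arr.foldl
    (fun r item => if item ∈ targetDigits then r + 1 else r) 0
  [score, rerollDice]

-- ===== PORT B =====
def classic_alt (arr : List Int) : List Int :=
  let counts := arr.foldl (fun d x => d.insert x (d.getD x 0 + 1)) PySem.Dict.empty
  let score := 10 * counts.getD 1 0 + 5 * counts.getD 5 0
  let reroll := counts.getD 2 0 + counts.getD 3 0 + counts.getD 4 0 + counts.getD 6 0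
  [score, reroll]

-- ===== PRECONDITION & SPEC =====
def Spec_classic (arr : List Int) (out : List Int) : Prop := out = classic_alt arr
instance (arr : List Int) (out : List Int) : Decidable (Spec_classic arr out) := by unfold Spec_classic; infer_instance

-- ===== CLAIM (what is proved, stated in full; the proofs are below) =====
def Claim_equal_classic : Prop := ∀ (arr : List Int), Dom_classic arr → Spec_classic arr (classic arr)

-- ===== LEMMAS AND PROOFS =====

theorem classic_score_foldl (arr : List Int) (s : Int) :
    arr.foldl (fun s v => if v = 1 then s + 10 else if v = 5 then s + 5 else s) s
      = s + 10 * (arr.count 1 : Int) + 5 * (arr.count 5 : Int) := by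
  induction arr generalizing s with
  | nil => simp
  | cons x xs ih =>
    simp only [List.foldl_cons, ih, List.count_cons]
    by_cases h1 : x = 1 <;> by_cases h5 : x = 5 <;>
      simp [h1, h5] <;> ring

theorem classic_reroll_foldl (arr : List Int) (r : Int) :
    arr.foldl (fun r item => if item ∈ PySem.Set.ofList [2, 3, 4, 6] then r + 1 else r) r
      = r + (arr.count 2 : Int) + (arr.count 3 : Int) + (arr.count 4 : Int) + (arr.count 6 : Int) := by
  induction arr generalizing r with
  | nil => simp
  | cons x xs ih =>
    simp only [List.foldl_cons, ih, List.count_cons]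
    by_cases h2 : x = 2 <;> by_cases h3 : x = 3 <;> by_cases h4 : x = 4 <;> by_cases h6 : x = 6 <;>
      simp_all [PySem.Set.mem_ofList] <;> ring

-- ===== VERDICT (by name: the statement is the Claim_ definition above) =====
theorem classic_spec : Claim_equal_classic := by
  intro arr _
  unfold Spec_classic classic classic_alt
  rw [PySem.List.foldl_pyRange_zero_pyGetD' arr 0
    (fun s v => if v = 1 then s + 10 else if v = 5 then s + 5 else s) 0]
  simp only [PySem.Dict.foldl_insert_getD_add_one_eq_counter, PySem.Dict.getD_counter,
    classic_score_foldl, classic_reroll_foldl]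
  ring_nf
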